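-- pv_equiv track=rewrite | github.com/tngjunwei/adventofcode2023 | day18.py | get_dimensions_of_area
-- ===== SOURCE A (Python) =====
-- dir_map = {
--     "U": (-1,0),
--     "D": (1,0),
--     "L": (0,-1),
--     "R": (0,1)
-- }
--
-- def get_dimensions_of_area(data):
--     curr = [0,0]
--     max_r, max_c = 0, 0
--
--     for entry in data:
--         direction = entry[0]
--         units = entry[1]
--         dr, dc = dir_map[direction]
--
--         curr[0] += dr * units
--         curr[1] += dc * units
--
--         max_r = max(max_r, curr[0])
--         max_c = max(max_c, curr[1])
--
--     return max_r+1, max_c+1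
-- ===== SOURCE B (Python) =====
-- dir_map = {
--     "U": (-1,0),
--     "D": (1,0),
--     "L": (0,-1),
--     "R": (0,1)
-- }
--
-- def get_dimensions_of_area(data):
--     # Divide-and-conquer reduction: each segment of moves is summarized by the
--     # pair (total displacement, max prefix sum incl. the empty prefix), and two
--     # adjacent segments combine associatively: (ls+rs, max(lm, ls+rm)).
--     def solve(ds):
--         if not ds:
--             return (0, 0)
--         if len(ds) == 1:
--             return (ds[0], max(0, ds[0]))
--         k = len(ds) // 2
--         ls, lm = solve(ds[:k])
--         rs, rm = solve(ds[k:])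
--         return (ls + rs, max(lm, ls + rm))
--     rows = [dir_map[d][0] * u for d, u in data]
--     cols = [dir_map[d][1] * u for d, u in data]
--     return solve(rows)[1] + 1, solve(cols)[1] + 1
-- ===== Notes on version B (the rewrite author's own statement) =====
-- stated objective: alternative
-- what changed: Replaces A's fused linear scan threading a mutable position and running maxima with a per-axis divide-and-conquer reduction: each half-segment is summarized by the pair (total displacement, max prefix sum) and the two summaries are merged with the associative combine (ls+rs, max(lm, ls+rm)).
import Mathlib
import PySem

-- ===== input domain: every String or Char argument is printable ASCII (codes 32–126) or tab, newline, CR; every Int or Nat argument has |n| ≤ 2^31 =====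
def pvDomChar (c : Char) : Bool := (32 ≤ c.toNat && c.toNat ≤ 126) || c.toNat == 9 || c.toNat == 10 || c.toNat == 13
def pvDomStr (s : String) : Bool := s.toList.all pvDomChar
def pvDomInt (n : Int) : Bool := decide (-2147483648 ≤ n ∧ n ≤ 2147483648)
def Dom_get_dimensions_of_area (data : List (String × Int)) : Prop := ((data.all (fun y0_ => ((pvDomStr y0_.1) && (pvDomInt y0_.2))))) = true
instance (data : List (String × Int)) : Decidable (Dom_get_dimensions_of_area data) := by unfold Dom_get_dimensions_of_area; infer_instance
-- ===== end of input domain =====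

-- B replaces A's fused linear scan (position + running maxima in one loop) with a per-axis
-- divide-and-conquer reduction: each segment is summarized as (total displacement, max prefix sum)
-- and halves merge with the associative combine (ls+rs, max(lm, ls+rm)).

-- ===== PORT A =====
def dirMap : PySem.Dict String (Int × Int) :=
  PySem.Dict.ofList [("U", ((-1 : Int), (0 : Int))), ("D", (1, 0)), ("L", (0, -1)), ("R", (0, 1))]

def get_dimensions_of_area (data : List (String × Int)) : Int × Int :=
  -- curr = [0,0]; max_r, max_c = 0, 0; loop over entries
  let st := data.foldl
    (fun (s : Int × Int × Int × Int) entry =>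
      let (cr, cc, mr, mc) := s
      match PySem.Dict.get? dirMap entry.1 with
      | some (dr, dc) =>
        let cr := cr + dr * entry.2
        let cc := cc + dc * entry.2
        (cr, cc, max mr cr, max mc cc)
      | none => (cr, cc, mr, mc))   -- Python raises KeyError here; excluded by Pre_
    (0, 0, 0, 0)
  (st.2.2.1 + 1, st.2.2.2 + 1)

-- ===== PORT B =====
-- combine of two segment summaries (total displacement, max prefix sum incl. empty prefix)
def pvCombine (a b : Int × Int) : Int × Int := (a.1 + b.1, max a.2 (a.1 + b.2))

def solveAxis (ds : List Int) : Int × Int :=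
  match ds with
  | [] => (0, 0)
  | [d] => (d, max 0 d)
  | a :: b :: t =>
    let l := a :: b :: t
    let k := l.length / 2
    pvCombine (solveAxis (l.take k)) (solveAxis (l.drop k))
termination_by ds.length
decreasing_by
  · simp only [List.length_take, List.length_cons]; omega
  · simp only [List.length_drop, List.length_cons]; omega

def get_dimensions_of_area_alt (data : List (String × Int)) : Int × Int :=
  let rows := data.map (fun e => ((PySem.Dict.get? dirMap e.1).getD (0, 0)).1 * e.2)
  let cols := data.map (fun e => ((PySem.Dict.get? dirMap e.1).getD (0, 0)).2 * e.2)
  ((solveAxis rows).2 + 1, (solveAxis cols).2 + 1)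

-- ===== PRECONDITION & SPEC =====
-- A raises KeyError (dir_map[direction]) whenever a direction is not one of "U","D","L","R"; Pre_ excludes exactly those inputs.
def Pre_get_dimensions_of_area (data : List (String × Int)) : Prop :=
  ∀ e ∈ data, e.1 = "U" ∨ e.1 = "D" ∨ e.1 = "L" ∨ e.1 = "R"
instance (data : List (String × Int)) : Decidable (Pre_get_dimensions_of_area data) := by
  unfold Pre_get_dimensions_of_area; infer_instance

def pvWitness_get_dimensions_of_area : (List (String × Int)) := [("R", 3), ("D", 2), ("L", 1)]

def Spec_get_dimensions_of_area (data : List (String × Int)) (out : Int × Int) : Prop := out = get_dimensions_of_area_alt data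
instance (data : List (String × Int)) (out : Int × Int) : Decidable (Spec_get_dimensions_of_area data out) := by unfold Spec_get_dimensions_of_area; infer_instance

-- ===== CLAIM (what is proved, stated in full; the proofs are below) =====
def Claim_equal_get_dimensions_of_area : Prop := ∀ (data : List (String × Int)), Dom_get_dimensions_of_area data → Pre_get_dimensions_of_area data → Spec_get_dimensions_of_area data (get_dimensions_of_area data)

-- ===== LEMMAS AND PROOFS =====

-- one-axis fused loop of A
def axisLoop (ds : List Int) (c m : Int) : Int × Int :=
  ds.foldl (fun (s : Int × Int) d => (s.1 + d, max s.2 (s.1 + d))) (c, m)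

-- A's fold splits into two independent axis loops (over the per-axis delta lists)
theorem foldA_split (data : List (String × Int))
    (h : ∀ e ∈ data, e.1 = "U" ∨ e.1 = "D" ∨ e.1 = "L" ∨ e.1 = "R")
    (cr cc mr mc : Int) :
    data.foldl
      (fun (s : Int × Int × Int × Int) entry =>
        let (cr, cc, mr, mc) := s
        match PySem.Dict.get? dirMap entry.1 with
        | some (dr, dc) =>
          let cr := cr + dr * entry.2
          let cc := cc + dc * entry.2
          (cr, cc, max mr cr, max mc cc)
        | none => (cr, cc, mr, mc))
      (cr, cc, mr, mc)
    = (let r := axisLoop (data.map (fun e => ((PySem.Dict.get? dirMap e.1).getD (0, 0)).1 * e.2)) cr mr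
       let c := axisLoop (data.map (fun e => ((PySem.Dict.get? dirMap e.1).getD (0, 0)).2 * e.2)) cc mc
       (r.1, c.1, r.2, c.2)) := by
  induction data generalizing cr cc mr mc with
  | nil => simp [axisLoop]
  | cons e t ih =>
    have hsome : ∃ dr dc : Int, PySem.Dict.get? dirMap e.1 = some (dr, dc) := by
      rcases h e (List.mem_cons_self) with he | he | he | he <;> rw [he]
      · exact ⟨-1, 0, by decide⟩
      · exact ⟨1, 0, by decide⟩
      · exact ⟨0, -1, by decide⟩
      · exact ⟨0, 1, by decide⟩
    obtain ⟨dr, dc, hk⟩ := hsome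
    simp only [List.foldl_cons, List.map_cons, axisLoop, List.foldl_cons, hk,
      Option.getD_some]
    exact ih (fun e he => h e (List.mem_cons_of_mem _ he)) (cr + dr * e.2) (cc + dc * e.2)
      (max mr (cr + dr * e.2)) (max mc (cc + dc * e.2))

-- shifting the fused loop's start: its result is the (0,0)-started result translated by c,
-- with the running max clipped against m (valid whenever c ≤ m)
theorem axisLoop_shift (ds : List Int) (c m : Int) (h : c ≤ m) :
    axisLoop ds c m = (c + (axisLoop ds 0 0).1, max m (c + (axisLoop ds 0 0).2)) := by
  induction ds generalizing c m with
  | nil => simp [axisLoop]; omega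
  | cons d t ih =>
    simp only [axisLoop, List.foldl_cons] at *
    rw [ih (c + d) (max m (c + d)) (le_max_right _ _),
        ih (0 + d) (max 0 (0 + d)) (le_max_right _ _)]
    simp only [Prod.mk.injEq]
    constructor <;> omega

-- concatenation of segments corresponds to pvCombine of their summaries
theorem axisLoop_append (l r : List Int) :
    axisLoop (l ++ r) 0 0 = pvCombine (axisLoop l 0 0) (axisLoop r 0 0) := by
  have hmono : ∀ (ds : List Int) (c m : Int), c ≤ m → (axisLoop ds c m).1 ≤ (axisLoop ds c m).2 := by
    intro ds
    induction ds with
    | nil => intro c m h; simpa [axisLoop] using h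
    | cons d t ih =>
      intro c m h
      simpa [axisLoop] using ih (c + d) (max m (c + d)) (le_max_right _ _)
  have hmono := hmono l 0 0 le_rfl
  have : axisLoop (l ++ r) 0 0 = axisLoop r (axisLoop l 0 0).1 (axisLoop l 0 0).2 := by
    simp [axisLoop, List.foldl_append]
  rw [this, axisLoop_shift r _ _ hmono, pvCombine]

-- the divide-and-conquer reduction computes the fused loop's summary
theorem solveAxis_eq (ds : List Int) : solveAxis ds = axisLoop ds 0 0 := by
  induction ds using solveAxis.induct with
  | case1 => simp [solveAxis, axisLoop]
  | case2 d => rw [solveAxis]; simp [axisLoop]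
  | case3 a b t l k ih1 ih2 =>
    rw [solveAxis]
    rw [ih1, ih2, ← axisLoop_append, List.take_append_drop]

-- ===== VERDICT (by name: the statement is the Claim_ definition above) =====
theorem get_dimensions_of_area_spec : Claim_equal_get_dimensions_of_area := by
  intro data _ hpre
  unfold Spec_get_dimensions_of_area get_dimensions_of_area get_dimensions_of_area_alt
  rw [foldA_split data hpre]
  simp only [solveAxis_eq]
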